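-- pv_equiv track=rewrite | github.com/julianzuo526/pathfuzz | distance/path_constrain.py | get_call_path
-- ===== SOURCE A (Python) =====
-- def get_call_path(call_graph, start, target):
--     path = []
--     visited = set()
--
--     def dfs(node, current_path):
--         if node in visited:
--             return False
--         visited.add(node)
--         current_path.append(node)
--         if node == target:
--             path.extend(current_path)
--             return True
--         for callee in call_graph.get(node, []):
--             if dfs(callee, current_path):
--                 return True
--         current_path.pop()
--         return False
--
--     dfs(start, [])
--     return path
-- ===== SOURCE B (Python) =====
-- def get_call_path(call_graph, start, target):
--     visited = set()
--     stack = [(start, [start])]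
--     while stack:
--         node, path = stack.pop()
--         if node in visited:
--             continue
--         visited.add(node)
--         if node == target:
--             return path
--         for callee in reversed(call_graph.get(node, [])):
--             stack.append((callee, path + [callee]))
--     return []
-- ===== Notes on version B (the rewrite author's own statement) =====
-- stated objective: alternative
-- what changed: A's recursive DFS with a mutated shared path/visited set is replaced by an iterative DFS over an explicit stack of (node, path) frames, pushing callees in reversed order and checking visited at pop time.
import Mathlib
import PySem

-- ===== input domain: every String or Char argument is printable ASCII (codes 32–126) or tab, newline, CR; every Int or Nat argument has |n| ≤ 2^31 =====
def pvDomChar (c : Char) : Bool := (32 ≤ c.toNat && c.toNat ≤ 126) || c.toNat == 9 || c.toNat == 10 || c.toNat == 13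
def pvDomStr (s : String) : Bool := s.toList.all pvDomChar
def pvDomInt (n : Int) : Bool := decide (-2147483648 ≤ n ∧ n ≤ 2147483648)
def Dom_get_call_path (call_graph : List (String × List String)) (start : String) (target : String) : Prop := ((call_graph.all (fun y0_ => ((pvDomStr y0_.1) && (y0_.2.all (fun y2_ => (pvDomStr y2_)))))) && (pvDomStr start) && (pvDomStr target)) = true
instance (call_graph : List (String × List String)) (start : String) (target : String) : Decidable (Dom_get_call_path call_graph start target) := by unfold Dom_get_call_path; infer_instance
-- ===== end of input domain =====

-- B replaces A's recursive DFS (mutating a shared visited set and path list) by an iterative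
-- DFS over an explicit stack of (node, path) frames; same return value, different
-- decomposition (no speed claim).

-- call_graph.get(node, []) (Python dict lookup with default), shared by both ports
def pvCallees (cg : List (String × List String)) (node : String) : List String :=
  (PySem.Dict.mk cg).getD node []

-- a node that is not a key of the graph has no callees (used by the loop's termination proof)
theorem pvCallees_not_key (cg : List (String × List String)) (node : String)
    (h : node ∉ cg.map Prod.fst) : pvCallees cg node = [] := by
  induction cg with
  | nil => rfl
  | cons p cg ih =>
    rcases p with ⟨k, vs⟩
    simp only [List.map_cons, List.mem_cons, not_or] at h
    simp only [pvCallees, PySem.Dict.getD_eq_get?_getD, PySem.Dict.get?_mk_cons] at ih ⊢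
    rw [if_neg (by simpa using fun hk => h.1 hk.symm)]
    exact ih h.2

-- removing a fresh node from the unvisited keys releases at least its callee-list weight
theorem pvSumFilter_le (w : String → Nat) (ks v : List String) (node : String) (hv : node ∉ v) :
    (if node ∈ ks then w node else 0) +
      ((ks.filter (fun k => !(decide (k ∈ v ++ [node])))).map w).sum ≤
      ((ks.filter (fun k => !(decide (k ∈ v)))).map w).sum := by
  induction ks with
  | nil => simp
  | cons a ks ih =>
    by_cases hav : a ∈ v
    · have h1 : a ∈ v ++ [node] := List.mem_append_left _ hav
      have hne : node ≠ a := fun h => hv (by rw [h]; exact hav)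
      have h2 : (node ∈ a :: ks) = (node ∈ ks) := by
        simp only [List.mem_cons, eq_iff_iff]
        exact ⟨fun h => h.elim (fun h => absurd h hne) id, Or.inr⟩
      rw [List.filter_cons_of_neg (by simp [h1]), List.filter_cons_of_neg (by simp [hav])]; simp only [h2]
      exact ih
    · by_cases han : a = node
      · subst han
        have h1 : a ∈ v ++ [a] := List.mem_append_right _ (List.mem_cons_self ..)
        rw [List.filter_cons_of_neg (by simp [h1]), List.filter_cons_of_pos (by simp [hav]),
          if_pos (List.mem_cons_self ..)]
        simp only [List.map_cons, List.sum_cons]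
        omega
      · have h1 : a ∉ v ++ [node] := by
          simp only [List.mem_append, List.mem_singleton, not_or]
          exact ⟨hav, han⟩
        have h2 : (node ∈ a :: ks) = (node ∈ ks) := by
          simp only [List.mem_cons, eq_iff_iff]
          exact ⟨fun h => h.elim (fun h => absurd h.symm han) id, Or.inr⟩
        rw [List.filter_cons_of_pos (by simp [h1]), List.filter_cons_of_pos (by simp [hav])]; simp only [h2]
        simp only [List.map_cons, List.sum_cons]
        omega

-- the loop's termination fact: visiting a fresh node pays for the frames it pushes
theorem pvFree_add (cg : List (String × List String)) (v : List String) (node : String)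
    (hv : node ∉ v) :
    (pvCallees cg node).length +
      ((((cg.map Prod.fst).filter (fun k => !(decide (k ∈ v ++ [node])))).map
        (fun k => (pvCallees cg k).length)).sum) ≤
      (((cg.map Prod.fst).filter (fun k => !(decide (k ∈ v)))).map
        (fun k => (pvCallees cg k).length)).sum := by
  have h := pvSumFilter_le (fun k => (pvCallees cg k).length) (cg.map Prod.fst) v node hv
  by_cases hk : node ∈ cg.map Prod.fst
  · simpa [hk] using h
  · rw [pvCallees_not_key cg node hk]
    simpa [hk] using h

-- ===== PORT A =====
-- A's inner 'dfs' threads the mutated 'visited' set and returns the found path: Python's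
-- outer 'path' is only filled on success, so it is an Option here, and 'current_path.pop()'
-- on failure is the caller keeping its own 'cur'.  The Nat argument is only a fuel guard for
-- termination; it bounds recursion depth, which Python bounds by the growth of 'visited',
-- and the fuel passed in get_call_path is never exhausted (shown by the equivalence proof:
-- the fueled run equals the total loop of port B).
mutual
def pvDfsA (cg : List (String × List String)) (target : String) :
    Nat → PySem.Set String → List String → String → PySem.Set String × Option (List String)
  | 0, v, _, _ => (v, none)
  | f+1, v, cur, node =>
    if node ∈ v then (v, none)
    else
      if node = target then (PySem.Set.add v node, some (cur ++ [node]))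
      else pvGoA cg target f (PySem.Set.add v node) (cur ++ [node]) (pvCallees cg node)
termination_by f _ _ _ => (f, 0)
-- the 'for callee in …' loop inside dfs
def pvGoA (cg : List (String × List String)) (target : String) :
    Nat → PySem.Set String → List String → List String → PySem.Set String × Option (List String)
  | _, v, _, [] => (v, none)
  | f, v, cur, c :: cs =>
    match pvDfsA cg target f v cur c with
    | (v1, some p) => (v1, some p)
    | (v1, none) => pvGoA cg target f v1 cur cs
termination_by f _ _ cs => (f, cs.length + 1)
end

def get_call_path (call_graph : List (String × List String)) (start : String) (target : String) : List String :=
  match pvDfsA call_graph target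
      ((start :: (call_graph.map Prod.fst ++ (call_graph.map Prod.snd).flatten)).length + 1)
      PySem.Set.empty [] start with
  | (_, some p) => p
  | (_, none) => []

-- ===== PORT B =====
-- Source B's while loop; the Lean list holds the Python stack top-first, so Python's
-- 'extend(reversed(callees))' then 'pop()' is prepending the callees in their order.
def pvLoopB (cg : List (String × List String)) (target : String) :
    PySem.Set String → List (String × List String) → List String
  | _, [] => []
  | v, (node, path) :: rest =>
    if hv : node ∈ v then pvLoopB cg target v rest
    else
      if node = target then path
      else pvLoopB cg target (PySem.Set.add v node)
        ((pvCallees cg node).map (fun c => (c, path ++ [c])) ++ rest)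
termination_by v stack =>
  stack.length + (((cg.map Prod.fst).filter (fun k => !(decide (k ∈ v)))).map
    (fun k => (pvCallees cg k).length)).sum
decreasing_by
  · simp only [List.length_cons]; omega
  · have h := pvFree_add cg v node hv
    rw [PySem.Set.add_of_not_mem hv]
    simp only [List.length_append, List.length_map, List.length_cons]
    omega

def get_call_path_alt (call_graph : List (String × List String)) (start : String) (target : String) : List String :=
  pvLoopB call_graph target PySem.Set.empty [(start, [start])]

-- ===== PRECONDITION & SPEC =====
def Spec_get_call_path (call_graph : List (String × List String)) (start : String) (target : String) (out : List String) : Prop := out = get_call_path_alt call_graph start target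
instance (call_graph : List (String × List String)) (start : String) (target : String) (out : List String) : Decidable (Spec_get_call_path call_graph start target out) := by unfold Spec_get_call_path; infer_instance

-- ===== CLAIM (what is proved, stated in full; the proofs are below) =====
def Claim_equal_get_call_path : Prop := ∀ (call_graph : List (String × List String)) (start : String) (target : String), Dom_get_call_path call_graph start target → Spec_get_call_path call_graph start target (get_call_path call_graph start target)

-- ===== LEMMAS AND PROOFS =====

-- callees always lie in the flattened value lists of the graph
theorem pvCallees_subset (cg : List (String × List String)) (n c : String)
    (hc : c ∈ pvCallees cg n) : c ∈ (cg.map Prod.snd).flatten := by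
  induction cg with
  | nil =>
    rw [show pvCallees [] n = [] from rfl] at hc
    cases hc
  | cons p cg ih =>
    rcases p with ⟨k, vs⟩
    simp only [pvCallees, PySem.Dict.getD_eq_get?_getD, PySem.Dict.get?_mk_cons] at ih hc
    simp only [List.map_cons, List.flatten_cons, List.mem_append]
    by_cases hk : k == n
    · rw [if_pos hk] at hc
      exact Or.inl (by simpa using hc)
    · rw [if_neg hk] at hc
      exact Or.inr (ih hc)

-- "A = B after this frame": either dfs found a path (the loop returns it) or the loop goes on
-- with dfs's final visited set
def pvStep (cg : List (String × List String)) (target : String)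
    (r : PySem.Set String × Option (List String)) (rest : List (String × List String)) :
    List String :=
  match r.2 with
  | some p => p
  | none => pvLoopB cg target r.1 rest

-- number of elements of U not yet visited (bounds the remaining recursion depth of dfs)
def pvK (U v : List String) : Nat := U.countP (fun x => decide (x ∉ v))

theorem pvK_append (U v w : List String) : pvK U (v ++ w) ≤ pvK U v :=
  List.countP_mono_left (by
    intro a _ ha
    simp only [decide_eq_true_eq, List.mem_append, not_or] at ha ⊢
    exact ha.1)

theorem pvK_lt (U v : List String) (node : String) (hU : node ∈ U) (hv : node ∉ v) :
    pvK U (v ++ [node]) < pvK U v := by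
  induction U with
  | nil => cases hU
  | cons a U ih =>
    unfold pvK at *
    simp only [List.countP_cons]
    by_cases ha : a = node
    · subst ha
      have h1 : (decide (a ∉ v ++ [a])) = false := by simp
      have h2 : (decide (a ∉ v)) = true := by simpa using hv
      have h3 : List.countP (fun x => decide (x ∉ v ++ [a])) U ≤
          List.countP (fun x => decide (x ∉ v)) U := pvK_append U v [a]
      rw [h1, h2]
      simp only [if_true, Bool.false_eq_true, if_false]
      omega
    · have hU' : node ∈ U := by
        rcases List.mem_cons.mp hU with h | h
        · exact absurd h.symm ha
        · exact h
      have h4 : (decide (a ∉ v ++ [node])) = (decide (a ∉ v)) := by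
        simp only [decide_eq_decide, List.mem_append, List.mem_singleton, not_or]
        constructor
        · exact fun h => h.1
        · exact fun h => ⟨h, ha⟩
      rw [h4]
      have := ih hU'
      omega

-- dfs only ever grows the visited set (by appending)
theorem pvMonoAll (cg : List (String × List String)) (target : String) :
    ∀ f : Nat,
      (∀ v cur node, ∃ w, (pvDfsA cg target f v cur node).1 = v ++ w) ∧
      (∀ cs v cur, ∃ w, (pvGoA cg target f v cur cs).1 = v ++ w) := by
  intro f
  induction f with
  | zero =>
    refine ⟨fun v cur node => ⟨[], by simp [pvDfsA]⟩, ?_⟩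
    intro cs
    induction cs with
    | nil => exact fun v cur => ⟨[], by simp [pvGoA]⟩
    | cons c cs ih =>
      intro v cur
      rw [pvGoA]
      simp only [pvDfsA]
      exact ih v cur
  | succ f ihf =>
    have hdfs : ∀ v cur node, ∃ w, (pvDfsA cg target (f+1) v cur node).1 = v ++ w := by
      intro v cur node
      rw [pvDfsA]
      by_cases hv : node ∈ v
      · exact ⟨[], by simp [hv]⟩
      · by_cases ht : node = target
        · subst ht
          exact ⟨[node], by simp [hv, PySem.Set.add_of_not_mem hv]⟩
        · obtain ⟨w, hw⟩ := ihf.2 (pvCallees cg node) (PySem.Set.add v node) (cur ++ [node])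
          exact ⟨node :: w, by
            simp only [hv, ht, if_neg, if_false]
            rw [hw, PySem.Set.add_of_not_mem hv, List.append_assoc]
            rfl⟩
    refine ⟨hdfs, ?_⟩
    intro cs
    induction cs with
    | nil => exact fun v cur => ⟨[], by simp [pvGoA]⟩
    | cons c cs ih =>
      intro v cur
      rw [pvGoA]
      obtain ⟨w1, hw1⟩ := hdfs v cur c
      rcases hr : pvDfsA cg target (f+1) v cur c with ⟨v1, r⟩
      rw [hr] at hw1
      simp only at hw1
      cases r with
      | some p => exact ⟨w1, hw1⟩
      | none =>
        obtain ⟨w2, hw2⟩ := ih v1 cur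
        exact ⟨w1 ++ w2, by simp only; rw [hw2, hw1, List.append_assoc]⟩

-- the simulation: one dfs call from a frame = running the loop from that frame
theorem pvSimAll (cg : List (String × List String)) (target : String) (U : List String)
    (hU : ∀ n c, c ∈ pvCallees cg n → c ∈ U) :
    ∀ f : Nat,
      (∀ v cur node rest, node ∈ U → pvK U v < f →
        pvLoopB cg target v ((node, cur ++ [node]) :: rest) =
          pvStep cg target (pvDfsA cg target f v cur node) rest) ∧
      (∀ cs, (∀ c ∈ cs, c ∈ U) → ∀ v cur rest, pvK U v < f →
        pvLoopB cg target v (cs.map (fun c => (c, cur ++ [c])) ++ rest) =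
          pvStep cg target (pvGoA cg target f v cur cs) rest) := by
  intro f
  induction f with
  | zero => exact ⟨fun _ _ _ _ _ h => absurd h (by omega),
      fun _ _ _ _ _ h => absurd h (by omega)⟩
  | succ f ihf =>
    have hdfs : ∀ v cur node rest, node ∈ U → pvK U v < f + 1 →
        pvLoopB cg target v ((node, cur ++ [node]) :: rest) =
          pvStep cg target (pvDfsA cg target (f+1) v cur node) rest := by
      intro v cur node rest hnode hK
      rw [pvLoopB, pvDfsA]
      by_cases hv : node ∈ v
      · simp [hv, pvStep]
      · by_cases ht : node = target
        · subst ht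
          simp [hv, pvStep]
        · simp only [hv, ht, dif_neg, if_neg, not_false_eq_true, if_false]
          have hK' : pvK U (PySem.Set.add v node) < f := by
            rw [PySem.Set.add_of_not_mem hv]
            have := pvK_lt U v node hnode hv
            omega
          exact ihf.2 (pvCallees cg node) (fun c hc => hU node c hc)
            (PySem.Set.add v node) (cur ++ [node]) rest hK'
    refine ⟨hdfs, ?_⟩
    intro cs
    induction cs with
    | nil =>
      intro _ v cur rest hK
      simp [pvGoA, pvStep]
    | cons c cs ih =>
      intro hcs v cur rest hK
      have hc : c ∈ U := hcs c (List.mem_cons_self ..)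
      have hcs' : ∀ x ∈ cs, x ∈ U := fun x hx => hcs x (List.mem_cons_of_mem _ hx)
      rw [pvGoA]
      simp only [List.map_cons, List.cons_append]
      rw [hdfs v cur c (cs.map (fun c => (c, cur ++ [c])) ++ rest) hc hK]
      rcases hr : pvDfsA cg target (f+1) v cur c with ⟨v1, r⟩
      have hw : ∃ w, v1 = v ++ w := by
        have h := (pvMonoAll cg target (f+1)).1 v cur c
        rw [hr] at h
        simpa using h
      obtain ⟨w, hw⟩ := hw
      cases r with
      | some p => simp [pvStep]
      | none =>
        have hK1 : pvK U v1 < f + 1 := by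
          have := pvK_append U v w
          rw [← hw] at this
          omega
        simp only [pvStep]
        exact ih hcs' v1 cur rest hK1

-- ===== VERDICT (by name: the statement is the Claim_ definition above) =====
theorem get_call_path_spec : Claim_equal_get_call_path := by
  intro cg start target _
  unfold Spec_get_call_path get_call_path_alt get_call_path
  set U := start :: (cg.map Prod.fst ++ (cg.map Prod.snd).flatten) with hUdef
  have hU : ∀ n c, c ∈ pvCallees cg n → c ∈ U := by
    intro n c hc
    rw [hUdef]
    exact List.mem_cons_of_mem _ (List.mem_append_right _ (pvCallees_subset cg n c hc))
  have hstart : start ∈ U := by rw [hUdef]; exact List.mem_cons_self ..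
  have hK : pvK U PySem.Set.empty < U.length + 1 := by
    have : pvK U PySem.Set.empty ≤ U.length := List.countP_le_length
    omega
  have h := (pvSimAll cg target U hU (U.length + 1)).1 PySem.Set.empty [] start [] hstart hK
  simp only [List.nil_append] at h
  rcases hr : pvDfsA cg target (U.length + 1) PySem.Set.empty [] start with ⟨v, r⟩
  rw [hr] at h
  cases r with
  | some p =>
    simp only [pvStep] at h
    simpa using h.symm
  | none =>
    simp only [pvStep] at h
    have h0 : pvLoopB cg target v [] = [] := by rw [pvLoopB]
    rw [h0] at h
    simpa using h.symm
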